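-- pv_equiv track=rewrite | github.com/jbudynek/advent-of-code | aoc2024/d24.py | get_max_xyz
-- ===== SOURCE A (Python) =====
-- def get_max_xyz(wire_to_value):
--     max_x, max_y, max_z = 0, 0, 0
--     for wire in wire_to_value.keys():
--         if wire[0] == "x" and int(wire[1:]) > max_x:
--             max_x = int(wire[1:])
--         if wire[0] == "y" and int(wire[1:]) > max_y:
--             max_y = int(wire[1:])
--         if wire[0] == "z" and int(wire[1:]) > max_z:
--             max_z = int(wire[1:])
--     return max_x, max_y, max_z
-- ===== SOURCE B (Python) =====
-- def get_max_xyz(wire_to_value):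
--     def best(c):
--         return max([0] + [int(w[1:]) for w in wire_to_value if w[0] == c])
--     return best("x"), best("y"), best("z")
-- ===== Notes on version B (the rewrite author's own statement) =====
-- stated objective: simpler
-- what changed: Replaces the single interleaved loop with three running maxima by three independent per-prefix reductions: for each of 'x','y','z' the max over a 0-seeded list of parsed suffixes of matching keys.
import Mathlib
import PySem

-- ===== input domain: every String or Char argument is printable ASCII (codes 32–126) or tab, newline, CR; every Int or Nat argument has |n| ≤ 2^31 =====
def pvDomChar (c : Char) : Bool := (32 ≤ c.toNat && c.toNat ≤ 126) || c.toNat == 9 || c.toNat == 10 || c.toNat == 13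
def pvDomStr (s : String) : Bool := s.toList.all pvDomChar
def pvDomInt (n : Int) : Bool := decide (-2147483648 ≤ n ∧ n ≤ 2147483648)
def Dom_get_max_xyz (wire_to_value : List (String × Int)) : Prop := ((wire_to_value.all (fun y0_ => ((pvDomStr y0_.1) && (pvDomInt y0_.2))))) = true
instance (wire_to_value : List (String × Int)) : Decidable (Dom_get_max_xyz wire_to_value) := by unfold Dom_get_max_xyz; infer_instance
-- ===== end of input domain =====

-- B replaces A's single interleaved loop by three independent per-prefix maxima (same O(n) cost);
-- equivalence is about the return value, neither version mutates its argument.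

-- int(w[1:]) — total form; on Pre_ the parse succeeds wherever Python evaluates it
def pvIntTail (w : String) : Int :=
  (PySem.Int.ofStr? (PySem.Str.slice w (some 1) none)).getD 0

-- ===== PORT A =====
def get_max_xyz (wire_to_value : List (String × Int)) : Int × Int × Int :=
  ((PySem.Dict.ofList wire_to_value).keys).foldl
    (fun st w =>
      let mx := if PySem.Str.pyGet? w 0 = some 'x' ∧ pvIntTail w > st.1 then pvIntTail w else st.1
      let my := if PySem.Str.pyGet? w 0 = some 'y' ∧ pvIntTail w > st.2.1 then pvIntTail w else st.2.1
      let mz := if PySem.Str.pyGet? w 0 = some 'z' ∧ pvIntTail w > st.2.2 then pvIntTail w else st.2.2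
      (mx, my, mz))
    (0, 0, 0)

-- ===== PORT B =====
-- best(c): max([0] + [int(w[1:]) for w in wire_to_value if w[0] == c])
def pvBest (c : Char) (ks : List String) : Int :=
  (PySem.List.max?
      (0 :: (ks.filter (fun w => decide (PySem.Str.pyGet? w 0 = some c))).map pvIntTail)
      (fun y => y)).getD 0

def get_max_xyz_alt (wire_to_value : List (String × Int)) : Int × Int × Int :=
  (pvBest 'x' (PySem.Dict.ofList wire_to_value).keys,
   pvBest 'y' (PySem.Dict.ofList wire_to_value).keys,
   pvBest 'z' (PySem.Dict.ofList wire_to_value).keys)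

-- ===== PRECONDITION & SPEC =====
-- Pre_ excludes exactly the inputs where Python A raises: an empty wire name (IndexError on wire[0])
-- or an x/y/z-prefixed wire whose suffix int() cannot parse (ValueError).
def Pre_get_max_xyz (wire_to_value : List (String × Int)) : Prop :=
  ∀ p ∈ wire_to_value, p.1 ≠ "" ∧
    ((PySem.Str.pyGet? p.1 0 = some 'x' ∨ PySem.Str.pyGet? p.1 0 = some 'y' ∨
      PySem.Str.pyGet? p.1 0 = some 'z') →
      (PySem.Int.ofStr? (PySem.Str.slice p.1 (some 1) none)).isSome = true)
instance (wire_to_value : List (String × Int)) : Decidable (Pre_get_max_xyz wire_to_value) := by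
  unfold Pre_get_max_xyz; infer_instance

def pvWitness_get_max_xyz : (List (String × Int)) := [("x01", 1), ("y2", 0), ("abc", 3)]

def Spec_get_max_xyz (wire_to_value : List (String × Int)) (out : Int × Int × Int) : Prop := out = get_max_xyz_alt wire_to_value
instance (wire_to_value : List (String × Int)) (out : Int × Int × Int) : Decidable (Spec_get_max_xyz wire_to_value out) := by unfold Spec_get_max_xyz; infer_instance

-- ===== CLAIM (what is proved, stated in full; the proofs are below) =====
def Claim_equal_get_max_xyz : Prop := ∀ (wire_to_value : List (String × Int)), Dom_get_max_xyz wire_to_value → Pre_get_max_xyz wire_to_value → Spec_get_max_xyz wire_to_value (get_max_xyz wire_to_value)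

-- ===== LEMMAS AND PROOFS =====

-- one component of A's running-max loop equals a fold of max over the filtered, parsed values
theorem pv_foldl_component (c : Char) (ks : List String) (m : Int) :
    ks.foldl (fun acc w => if PySem.Str.pyGet? w 0 = some c ∧ pvIntTail w > acc then pvIntTail w else acc) m
      = ((ks.filter (fun w => decide (PySem.Str.pyGet? w 0 = some c))).map pvIntTail).foldl max m := by
  induction ks generalizing m with
  | nil => rfl
  | cons a t ih =>
    rw [List.foldl_cons, List.filter_cons]
    by_cases hc : PySem.Str.pyGet? a 0 = some c
    · by_cases hv : pvIntTail a > m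
      · rw [if_pos ⟨hc, hv⟩, if_pos (by simpa using hc), List.map_cons, List.foldl_cons,
          ih, max_eq_right (le_of_lt hv)]
      · rw [if_neg (fun h => hv h.2), if_pos (by simpa using hc), List.map_cons, List.foldl_cons,
          ih, max_eq_left (not_lt.mp hv)]
    · rw [if_neg (fun h => hc h.1), if_neg (by simpa using hc), ih]

-- A's triple fold splits into three independent component folds
theorem pv_foldl_triple (ks : List String) (st : Int × Int × Int) :
    ks.foldl
      (fun st w =>
        let mx := if PySem.Str.pyGet? w 0 = some 'x' ∧ pvIntTail w > st.1 then pvIntTail w else st.1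
        let my := if PySem.Str.pyGet? w 0 = some 'y' ∧ pvIntTail w > st.2.1 then pvIntTail w else st.2.1
        let mz := if PySem.Str.pyGet? w 0 = some 'z' ∧ pvIntTail w > st.2.2 then pvIntTail w else st.2.2
        (mx, my, mz)) st
      = (ks.foldl (fun acc w => if PySem.Str.pyGet? w 0 = some 'x' ∧ pvIntTail w > acc then pvIntTail w else acc) st.1,
         ks.foldl (fun acc w => if PySem.Str.pyGet? w 0 = some 'y' ∧ pvIntTail w > acc then pvIntTail w else acc) st.2.1,
         ks.foldl (fun acc w => if PySem.Str.pyGet? w 0 = some 'z' ∧ pvIntTail w > acc then pvIntTail w else acc) st.2.2) := by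
  induction ks generalizing st with
  | nil => rfl
  | cons a t ih =>
    rw [List.foldl_cons]
    exact ih _

theorem pvBest_eq_component (c : Char) (ks : List String) :
    ks.foldl (fun acc w => if PySem.Str.pyGet? w 0 = some c ∧ pvIntTail w > acc then pvIntTail w else acc) 0
      = pvBest c ks := by
  rw [pv_foldl_component]
  simp [pvBest, PySem.List.max?_id_cons]

-- ===== VERDICT (by name: the statement is the Claim_ definition above) =====
theorem get_max_xyz_spec : Claim_equal_get_max_xyz := by
  intro wtv _ _
  unfold Spec_get_max_xyz get_max_xyz get_max_xyz_alt
  rw [pv_foldl_triple, pvBest_eq_component 'x', pvBest_eq_component 'y', pvBest_eq_component 'z']
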